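-- pv_equiv track=rewrite | github.com/selfapplied/TiddlyWiki5 | lattice/pyramid.py | detect_beta_sheets
-- ===== SOURCE A (Python) =====
-- def detect_beta_sheets(pyramid):
--     """Detect planar sheet structures"""
--     sheets = []
--     # Find planes of constant properties
--     for residue in range(1, 10):
--         sheet_points = []
--         for layer in pyramid:
--             for point in layer:
--                 x, y, z, res = point
--                 if res == residue:
--                     sheet_points.append((x, y, z))
--         if sheet_points:
--             sheets.append(sheet_points)
--     return sheets
-- ===== SOURCE B (Python) =====
-- def detect_beta_sheets(pyramid):
--     """Detect planar sheet structures"""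
--     groups = {}
--     for layer in pyramid:
--         for point in layer:
--             x, y, z, res = point
--             groups.setdefault(res, []).append((x, y, z))
--     return [groups[r] for r in range(1, 10) if r in groups]
-- ===== Notes on version B (the rewrite author's own statement) =====
-- stated objective: faster
-- what changed: A rescans the whole pyramid once per residue (9 full passes, appending per residue then keeping non-empty lists); B makes a single pass grouping points into a dict keyed by residue, then emits the groups for residues 1..9 in ascending order.
import Mathlib
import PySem

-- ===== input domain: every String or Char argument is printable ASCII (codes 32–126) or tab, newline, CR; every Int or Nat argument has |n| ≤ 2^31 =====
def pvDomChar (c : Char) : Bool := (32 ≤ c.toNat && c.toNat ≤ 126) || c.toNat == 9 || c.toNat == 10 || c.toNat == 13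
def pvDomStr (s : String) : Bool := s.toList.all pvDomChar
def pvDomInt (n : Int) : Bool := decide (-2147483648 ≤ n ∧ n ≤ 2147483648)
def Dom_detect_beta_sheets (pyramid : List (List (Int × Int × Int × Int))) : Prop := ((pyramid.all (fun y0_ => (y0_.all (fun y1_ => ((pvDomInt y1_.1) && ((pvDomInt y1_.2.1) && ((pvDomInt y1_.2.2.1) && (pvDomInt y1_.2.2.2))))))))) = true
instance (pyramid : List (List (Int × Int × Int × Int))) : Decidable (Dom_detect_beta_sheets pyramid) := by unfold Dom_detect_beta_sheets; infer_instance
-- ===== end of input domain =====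

-- B replaces A's nine rescans of the pyramid (one per residue) by a single grouping
-- pass into a dict keyed by residue, emitting residues 1..9 in ascending order.

-- ===== PORT A =====
def detect_beta_sheets (pyramid : List (List (Int × Int × Int × Int))) : List (List (Int × Int × Int)) :=
  (PySem.List.pyRange 1 10 1).foldl (fun sheets residue =>
    let sheet_points := pyramid.foldl (fun sp layer =>
      layer.foldl (fun sp point =>
        if point.2.2.2 == residue then sp ++ [(point.1, point.2.1, point.2.2.1)] else sp) sp) []
    if sheet_points.isEmpty then sheets else sheets ++ [sheet_points]) []

-- ===== PORT B =====
def detect_beta_sheets_alt (pyramid : List (List (Int × Int × Int × Int))) : List (List (Int × Int × Int)) :=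
  let groups : PySem.Dict Int (List (Int × Int × Int)) :=
    pyramid.foldl (fun g layer =>
      layer.foldl (fun g point =>
        g.modify point.2.2.2 [] (· ++ [(point.1, point.2.1, point.2.2.1)])) g) PySem.Dict.empty
  ((PySem.List.pyRange 1 10 1).filter (fun r => groups.contains r)).map
    (fun r => (groups.get? r).getD [])

-- ===== PRECONDITION & SPEC =====
def Spec_detect_beta_sheets (pyramid : List (List (Int × Int × Int × Int))) (out : List (List (Int × Int × Int))) : Prop := out = detect_beta_sheets_alt pyramid
instance (pyramid : List (List (Int × Int × Int × Int))) (out : List (List (Int × Int × Int))) : Decidable (Spec_detect_beta_sheets pyramid out) := by unfold Spec_detect_beta_sheets; infer_instance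

-- ===== CLAIM (what is proved, stated in full; the proofs are below) =====
def Claim_equal_detect_beta_sheets : Prop := ∀ (pyramid : List (List (Int × Int × Int × Int))), Dom_detect_beta_sheets pyramid → Spec_detect_beta_sheets pyramid (detect_beta_sheets pyramid)

-- ===== LEMMAS AND PROOFS =====

-- all points of residue r, in A's (and B's) traversal order
def pvC (r : Int) (pyramid : List (List (Int × Int × Int × Int))) : List (Int × Int × Int) :=
  (pyramid.flatten.filter (fun pt => pt.2.2.2 == r)).map (fun pt => (pt.1, pt.2.1, pt.2.2.1))

theorem pv_isEmpty_filter (l : List (Int × Int × Int × Int)) (p : (Int × Int × Int × Int) → Bool) :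
    (l.filter p).isEmpty = !l.any p := by
  induction l with
  | nil => simp
  | cons a t ih => by_cases h : p a <;> simp [h, ih]

theorem pvC_cons (r : Int) (layer : List (Int × Int × Int × Int)) (rest : List (List (Int × Int × Int × Int))) :
    pvC r (layer :: rest)
    = (layer.filter (fun pt => pt.2.2.2 == r)).map (fun pt => (pt.1, pt.2.1, pt.2.2.1)) ++ pvC r rest := by
  simp [pvC, List.filter_append]

-- the grouping dict B builds
def pvBuild (pyramid : List (List (Int × Int × Int × Int))) (d : PySem.Dict Int (List (Int × Int × Int))) : PySem.Dict Int (List (Int × Int × Int)) :=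
  pyramid.foldl (fun g layer =>
    layer.foldl (fun g point =>
      g.modify point.2.2.2 [] (· ++ [(point.1, point.2.1, point.2.2.1)])) g) d

theorem pvA_inner (r : Int) (pyramid : List (List (Int × Int × Int × Int))) (sp : List (Int × Int × Int)) :
    pyramid.foldl (fun sp layer =>
      layer.foldl (fun sp point =>
        if point.2.2.2 == r then sp ++ [(point.1, point.2.1, point.2.2.1)] else sp) sp) sp
    = sp ++ pvC r pyramid := by
  induction pyramid generalizing sp with
  | nil => simp [pvC]
  | cons layer rest ih =>
      rw [List.foldl_cons, PySem.List.foldl_append_if, ih]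
      simp [pvC, List.filter_append, List.append_assoc]

theorem pvB_getD (pyramid : List (List (Int × Int × Int × Int))) (d : PySem.Dict Int (List (Int × Int × Int))) (r : Int) :
    (pvBuild pyramid d).getD r [] = d.getD r [] ++ pvC r pyramid := by
  induction pyramid generalizing d with
  | nil => simp [pvBuild, pvC]
  | cons layer rest ih =>
      have hl : layer.foldl (fun g point =>
          g.modify point.2.2.2 [] (· ++ [(point.1, point.2.1, point.2.2.1)])) d
          = (layer.map (fun pt => (pt.2.2.2, (pt.1, pt.2.1, pt.2.2.1)))).foldl
              (fun g p => g.modify p.1 [] (· ++ [p.2])) d := by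
        rw [List.foldl_map]
      simp only [pvBuild, List.foldl_cons] at ih ⊢
      rw [ih, hl, PySem.Dict.getD_foldl_modify_append]
      simp [pvC, List.flatten_cons, List.filter_append, List.map_append, List.filter_map,
        Function.comp_def, List.map_map]

theorem pvB_contains (pyramid : List (List (Int × Int × Int × Int))) (d : PySem.Dict Int (List (Int × Int × Int))) (r : Int) :
    (pvBuild pyramid d).contains r
    = (d.contains r || !(pvC r pyramid).isEmpty) := by
  induction pyramid generalizing d with
  | nil => simp [pvBuild, pvC]
  | cons layer rest ih =>
      simp only [pvBuild, List.foldl_cons] at ih ⊢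
      rw [ih]
      have hl : ∀ (d : PySem.Dict Int (List (Int × Int × Int))),
          (layer.foldl (fun g point =>
            g.modify point.2.2.2 [] (· ++ [(point.1, point.2.1, point.2.2.1)])) d).contains r
          = (d.contains r || layer.any (fun pt => pt.2.2.2 == r)) := by
        induction layer with
        | nil => simp
        | cons pt tl ihl =>
            intro d
            simp only [List.foldl_cons, ihl, PySem.Dict.contains_modify, List.any_cons]
            cases h : (r == pt.2.2.2) <;> cases h2 : (pt.2.2.2 == r) <;> simp_all [BEq.comm]
      rw [hl, pvC_cons]
      have h2 : ((layer.filter (fun pt => pt.2.2.2 == r)).map (fun pt => (pt.1, pt.2.1, pt.2.2.1))).isEmpty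
          = !layer.any (fun pt => pt.2.2.2 == r) := by
        rw [← pv_isEmpty_filter]
        cases layer.filter (fun pt => pt.2.2.2 == r) <;> simp
      have h1 : ∀ (a b : List (Int × Int × Int)), (a ++ b).isEmpty = (a.isEmpty && b.isEmpty) :=
        fun a b => by cases a <;> simp
      rw [h1, h2]
      cases d.contains r <;> cases layer.any (fun pt => pt.2.2.2 == r) <;>
        cases (pvC r rest).isEmpty <;> simp

theorem pv_main (pyramid : List (List (Int × Int × Int × Int))) (rs : List Int) (sheets : List (List (Int × Int × Int))) :
    rs.foldl (fun sheets r => if (pvC r pyramid).isEmpty then sheets else sheets ++ [pvC r pyramid]) sheets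
    = sheets ++ (rs.filter (fun r => (pvBuild pyramid PySem.Dict.empty).contains r)).map
        (fun r => ((pvBuild pyramid PySem.Dict.empty).get? r).getD []) := by
  induction rs generalizing sheets with
  | nil => simp
  | cons r tl ih =>
      have hc : (pvBuild pyramid PySem.Dict.empty).contains r = !(pvC r pyramid).isEmpty := by
        rw [pvB_contains]; simp
      have hv : ((pvBuild pyramid PySem.Dict.empty).get? r).getD [] = pvC r pyramid := by
        rw [← PySem.Dict.getD_eq_get?_getD, pvB_getD]; simp
      simp only [List.foldl_cons, List.filter_cons, hc, ih]
      cases h : (pvC r pyramid).isEmpty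
      · simp [hv]
      · simp

-- ===== VERDICT (by name: the statement is the Claim_ definition above) =====
theorem detect_beta_sheets_spec : Claim_equal_detect_beta_sheets := by
  intro pyramid _
  unfold Spec_detect_beta_sheets detect_beta_sheets detect_beta_sheets_alt
  have hbody : (fun (sheets : List (List (Int × Int × Int))) (residue : Int) =>
      let sheet_points := pyramid.foldl (fun sp layer =>
        layer.foldl (fun sp point =>
          if point.2.2.2 == residue then sp ++ [(point.1, point.2.1, point.2.2.1)] else sp) sp) []
      if sheet_points.isEmpty then sheets else sheets ++ [sheet_points])
      = (fun sheets r => if (pvC r pyramid).isEmpty then sheets else sheets ++ [pvC r pyramid]) := by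
    funext sheets r
    simp only [pvA_inner, List.nil_append]
  rw [hbody, pv_main]
  rfl
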